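-- pv_equiv track=rewrite | github.com/nickyjs/-Praktikum-ASD-Semester-4_NickyJS_UMS | modul 1/nomer1.py | JumlahHurufKonsonan
-- ===== SOURCE A (Python) =====
-- def JumlahHurufKonsonan(hrf):
--     konsonan = 'bcdfghjklmnpqrstvwxyzBCDFGHJKLMNPQRSTVWXYZ'
--     b = 0
--     hasil = 0
--     for i in hrf:
--         if i in konsonan:
--             b += len(i)
--         else:
--             b += 0
--
--     hasil = len(hrf), b
--     return hasil
-- ===== SOURCE B (Python) =====
-- def JumlahHurufKonsonan(hrf):
--     konsonan = 'bcdfghjklmnpqrstvwxyzBCDFGHJKLMNPQRSTVWXYZ'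
--     freq = {}
--     for ch in hrf:
--         freq[ch] = freq.get(ch, 0) + 1
--     b = sum(v for k, v in freq.items() if k in konsonan)
--     return len(hrf), b
-- ===== Notes on version B (the rewrite author's own statement) =====
-- stated objective: alternative
-- what changed: B builds a character-frequency dict in one pass and then sums the multiplicities of the distinct characters that are consonants, instead of A's per-character membership scan with a running counter.
import Mathlib
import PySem

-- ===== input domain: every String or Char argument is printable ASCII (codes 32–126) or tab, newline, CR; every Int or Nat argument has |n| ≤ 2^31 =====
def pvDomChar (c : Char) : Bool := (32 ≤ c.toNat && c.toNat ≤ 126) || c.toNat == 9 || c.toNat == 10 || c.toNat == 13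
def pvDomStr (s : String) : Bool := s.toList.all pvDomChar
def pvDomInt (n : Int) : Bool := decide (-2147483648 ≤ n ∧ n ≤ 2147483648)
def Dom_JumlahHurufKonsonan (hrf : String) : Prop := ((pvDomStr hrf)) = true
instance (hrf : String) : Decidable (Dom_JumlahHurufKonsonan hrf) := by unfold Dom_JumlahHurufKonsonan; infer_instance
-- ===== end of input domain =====

def pvKons : List Char := "bcdfghjklmnpqrstvwxyzBCDFGHJKLMNPQRSTVWXYZ".toList

-- B replaces A's per-character scan of the 42-char consonant string by a frequency
-- table built once, then a pass over the DISTINCT characters (objective: alternative).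

-- ===== PORT A =====
-- 'i in konsonan' on a single character of a string is exactly character membership.
def JumlahHurufKonsonan (hrf : String) : Int × Int :=
  let b : Int := hrf.toList.foldl
    (fun b i => if pvKons.contains i then b + 1 else b + 0) 0
  (PySem.Str.len hrf, b)

-- ===== PORT B =====
-- freq = {}; for ch in hrf: freq[ch] = freq.get(ch, 0) + 1
-- b = sum(v for k, v in freq.items() if k in konsonan)
def JumlahHurufKonsonan_alt (hrf : String) : Int × Int :=
  let freq : PySem.Dict Char Int :=
    hrf.toList.foldl (fun d ch => d.insert ch (d.getD ch 0 + 1)) PySem.Dict.empty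
  let b : Int := ((freq.items.filter (fun kv => pvKons.contains kv.1)).map (·.2)).sum
  (PySem.Str.len hrf, b)

-- ===== PRECONDITION & SPEC =====
def Spec_JumlahHurufKonsonan (hrf : String) (out : Int × Int) : Prop := out = JumlahHurufKonsonan_alt hrf
instance (hrf : String) (out : Int × Int) : Decidable (Spec_JumlahHurufKonsonan hrf out) := by unfold Spec_JumlahHurufKonsonan; infer_instance

-- ===== CLAIM (what is proved, stated in full; the proofs are below) =====
def Claim_equal_JumlahHurufKonsonan : Prop := ∀ (hrf : String), Dom_JumlahHurufKonsonan hrf → Spec_JumlahHurufKonsonan hrf (JumlahHurufKonsonan hrf)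

-- ===== LEMMAS AND PROOFS =====

-- Summing the multiplicities of the distinct keys selected by p gives countP p.
theorem pv_sum_counts (p : Char → Bool) (xs ks : List Char)
    (hnd : ks.Nodup) (hmem : ∀ a ∈ xs, a ∈ ks) :
    ((ks.filter p).map (fun k => (xs.count k : Int))).sum = (xs.countP p : Int) := by
  induction xs with
  | nil => simp
  | cons x xs ih =>
    have hx : x ∈ ks := hmem x (by simp)
    have hmem' : ∀ a ∈ xs, a ∈ ks := fun a ha => hmem a (by simp [ha])
    have hsplit :
        ((ks.filter p).map (fun k => ((x :: xs).count k : Int))).sum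
          = ((ks.filter p).map (fun k => (xs.count k : Int))).sum
            + ((ks.filter p).map (fun k => if (fun k => k == x) k then (1 : Int) else 0)).sum := by
      rw [← PySem.List.sum_map_add_int]
      refine congrArg List.sum (List.map_congr_left ?_)
      intro k _
      by_cases h : k = x
      · subst h
        simp
      · simp [h, Ne.symm h]
    have hind :
        ((ks.filter p).map (fun k => if (fun k => k == x) k then (1 : Int) else 0)).sum
          = if p x then (1 : Int) else 0 := by
      rw [PySem.List.sum_map_ite_one_zero]
      have hc : (ks.filter p).countP (fun k => k == x) = (ks.filter p).count x := by
        simp [List.count]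
      rw [hc]
      by_cases hp : p x
      · rw [List.count_filter hp, List.count_eq_one_of_mem hnd hx]
        simp [hp]
      · rw [List.count_eq_zero.mpr (by simp [List.mem_filter, hp])]
        simp [hp]
    rw [hsplit, ih hmem', hind, List.countP_cons]
    by_cases hp : p x <;> simp [hp]

-- ===== VERDICT (by name: the statement is the Claim_ definition above) =====
theorem JumlahHurufKonsonan_spec : Claim_equal_JumlahHurufKonsonan := by
  intro hrf _
  simp only [Spec_JumlahHurufKonsonan, JumlahHurufKonsonan, JumlahHurufKonsonan_alt]
  congr 1
  -- A's accumulator is a countP; B's loop is Counter, whose items pair the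
  -- distinct characters with their multiplicities
  rw [PySem.Dict.foldl_insert_getD_add_one_eq_counter, PySem.Dict.items_counter,
    List.filter_map, List.map_map]
  simp only [add_zero]
  rw [PySem.List.foldl_count_if]
  simp only [Function.comp_def, zero_add]
  exact (pv_sum_counts (fun k => pvKons.contains k) hrf.toList (PySem.Set.ofList hrf.toList)
    (PySem.Set.nodup_ofList _) (fun a ha => (PySem.Set.mem_ofList _ _).mpr ha)).symm
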